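-- pv_equiv track=rewrite | github.com/albertmenglongli/Algorithms | CodingInterviewGuide/C5_String/C5_RemoveKZeros.py | remove_k_zeros
-- ===== SOURCE A (Python) =====
-- def remove_k_zeros(s, k):
--     eles = list(s)
--     cnt = 0
--     start = -1
--     for idx, c in enumerate(eles):
--         if c == '0':
--             cnt += 1
--         else:
--             if cnt == k and idx - 1 >= 0 and eles[idx - 1] == '0':
--                 for i in range(start + 1, start + k + 1):
--                     eles[i] = 'N/A'
--             start = idx
--             cnt = 0
--     if cnt == k:
--         for i in range(start + 1, start + k + 1):
--             eles[i] = 'N/A'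
--     return ''.join((e for e in eles if e != 'N/A'))
-- ===== SOURCE B (Python) =====
-- def remove_k_zeros(s, k):
--     # Run-based rewrite: split s into maximal runs of equal characters with two
--     # pointers, drop each run of '0's whose length is exactly k, join the rest.
--     out = []
--     i, n = 0, len(s)
--     while i < n:
--         j = i
--         while j < n and s[j] == s[i]:
--             j += 1
--         if not (s[i] == '0' and j - i == k):
--             out.append(s[i:j])
--         i = j
--     return ''.join(out)
-- ===== Notes on version B (the rewrite author's own statement) =====
-- stated objective: alternative
-- what changed: B scans the string with two pointers into maximal runs of equal characters and joins the runs that are not a '0'-run of length exactly k, instead of A's char-by-char counter that overwrites the zeros of a matched run with an 'N/A' sentinel in a mutable list and filters the sentinel out at the end.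
import Mathlib
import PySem

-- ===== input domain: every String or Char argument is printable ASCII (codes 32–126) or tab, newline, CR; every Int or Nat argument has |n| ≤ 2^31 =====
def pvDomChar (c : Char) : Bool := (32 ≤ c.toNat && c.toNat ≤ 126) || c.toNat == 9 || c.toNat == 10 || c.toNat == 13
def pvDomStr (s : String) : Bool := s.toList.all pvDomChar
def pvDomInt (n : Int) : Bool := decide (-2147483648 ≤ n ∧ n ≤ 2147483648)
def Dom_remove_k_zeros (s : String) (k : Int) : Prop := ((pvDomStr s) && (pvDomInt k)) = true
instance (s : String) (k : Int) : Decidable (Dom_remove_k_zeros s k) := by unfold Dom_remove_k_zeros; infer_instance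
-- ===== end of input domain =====

-- B replaces A's sentinel-marking counter loop by a two-pointer scan over maximal runs
-- of equal characters that simply keeps every run except a '0'-run of length exactly k
-- (alternative decomposition, same O(n) cost).


-- ===== PORT A =====
-- 'for i in range(start + 1, start + k + 1): eles[i] = "N/A"'
def removeKMark (eles : List String) (a b : Int) : List String :=
  (PySem.List.pyRange a b 1).foldl (fun es i => PySem.List.pySetD es i "N/A") eles

-- one iteration of A's 'for idx, c in enumerate(eles)' body (c read from the live list)
def removeKStep (k : Int) (st : List String × Int × Int) (idx : Nat) : List String × Int × Int :=
  let eles := st.1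
  let cnt := st.2.1
  let start := st.2.2
  let c := PySem.List.pyGetD eles (idx : Int) ""
  if c == "0" then
    (eles, cnt + 1, start)
  else
    let eles' :=
      if (cnt == k) && decide ((idx : Int) - 1 ≥ 0) && (PySem.List.pyGetD eles ((idx : Int) - 1) "" == "0")
      then removeKMark eles (start + 1) (start + k + 1)
      else eles
    (eles', 0, (idx : Int))

def remove_k_zeros (s : String) (k : Int) : String :=
  let eles0 := s.toList.map (fun c => String.ofList [c])
  let r := (List.range eles0.length).foldl (removeKStep k) (eles0, 0, -1)
  let eles := if r.2.1 == k then removeKMark r.1 (r.2.2 + 1) (r.2.2 + k + 1) else r.1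
  PySem.Str.join "" (eles.filter (fun e => e != "N/A"))

-- ===== PORT B =====
-- inner 'while j < n and s[j] == s[i]: j += 1' (c is s[i])
def altRunEnd (cs : List Char) (c : Char) (j : Nat) : Nat :=
  if h : j < cs.length then
    if cs[j] == c then altRunEnd cs c (j + 1) else j
  else j
termination_by cs.length - j

theorem altRunEnd_ge (cs : List Char) (c : Char) (j : Nat) : j ≤ altRunEnd cs c j := by
  unfold altRunEnd
  split
  · split
    · have := altRunEnd_ge cs c (j + 1); omega
    · exact Nat.le_refl _
  · exact Nat.le_refl _
termination_by cs.length - j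

-- outer 'while i < n' loop; each step consumes one maximal run s[i:j]
def altLoop (cs : List Char) (k : Int) (i : Nat) : List String :=
  if h : i < cs.length then
    let j := altRunEnd cs cs[i] (i + 1)
    let rest := altLoop cs k j
    if cs[i] == '0' && ((j : Int) - (i : Int) == k) then rest
    else String.ofList (PySem.List.slice cs (some (i : Int)) (some (j : Int))) :: rest
  else []
termination_by cs.length - i
decreasing_by have := altRunEnd_ge cs cs[i] (i + 1); omega

def remove_k_zeros_alt (s : String) (k : Int) : String :=
  PySem.Str.join "" (altLoop s.toList k 0)

-- ===== PRECONDITION & SPEC =====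
def Spec_remove_k_zeros (s : String) (k : Int) (out : String) : Prop := out = remove_k_zeros_alt s k
instance (s : String) (k : Int) (out : String) : Decidable (Spec_remove_k_zeros s k out) := by unfold Spec_remove_k_zeros; infer_instance

-- ===== CLAIM (what is proved, stated in full; the proofs are below) =====
def Claim_equal_remove_k_zeros : Prop := ∀ (s : String) (k : Int), Dom_remove_k_zeros s k → Spec_remove_k_zeros s k (remove_k_zeros s k)

-- ===== LEMMAS AND PROOFS =====

-- common middle spec: scan chars keeping a count of the current trailing zero run
def tailSpec (k : Int) (cnt : Nat) : List Char → List Char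
  | [] => if (cnt : Int) = k then [] else List.replicate cnt '0'
  | c :: rest =>
    if c = '0' then tailSpec k (cnt + 1) rest
    else (if (cnt : Int) = k then [] else List.replicate cnt '0') ++ c :: tailSpec k 0 rest

-- A's final marking + filter, as a function of the loop's final state
def finishFilter (k : Int) (r : List String × Int × Int) : List String :=
  (if r.2.1 == k then removeKMark r.1 (r.2.2 + 1) (r.2.2 + k + 1) else r.1).filter (fun e => e != "N/A")

theorem singleton_ne_NA (c : Char) : (String.ofList [c] = "N/A") = False := by
  simp only [eq_iff_iff, iff_false]
  intro h; have := congrArg String.toList h; simp at this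

theorem join_nil_eq_flatten (L : List (List Char)) : PySem.Chars.join [] L = L.flatten := by
  induction L with
  | nil => simp [PySem.Chars.join_nil]
  | cons p t ih =>
    cases t with
    | nil => simp [PySem.Chars.join_singleton]
    | cons q r => rw [PySem.Chars.join_cons_cons, ih]; simp

theorem mark_spec (m : Nat) : ∀ (xs ys : List String),
    removeKMark (xs ++ List.replicate m "0" ++ ys) (xs.length : Int) ((xs.length : Int) + (m : Int)) =
      xs ++ List.replicate m "N/A" ++ ys := by
  induction m with
  | zero =>
    intro xs ys
    unfold removeKMark
    rw [PySem.List.pyRange_one_eq_nil (by omega)]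
    simp
  | succ m ih =>
    intro xs ys
    unfold removeKMark
    rw [PySem.List.pyRange_one_cons (by omega)]
    simp only [List.foldl_cons]
    rw [PySem.List.pySetD_natCast]
    have hset : (xs ++ List.replicate (m + 1) "0" ++ ys).set xs.length "N/A" =
        (xs ++ ["N/A"]) ++ List.replicate m "0" ++ ys := by
      rw [List.replicate_succ, List.set_append]
      simp
    rw [hset]
    have hmain := ih (xs ++ ["N/A"]) ys
    unfold removeKMark at hmain
    have harg : ((xs ++ ["N/A"]).length : Int) = (xs.length : Int) + 1 := by simp
    rw [harg] at hmain
    have harg2 : (xs.length : Int) + 1 + (m : Int) = (xs.length : Int) + ((m : Int) + 1) := by omega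
    rw [harg2] at hmain
    push_cast
    rw [hmain]
    simp [List.replicate_succ]

theorem getD_append_length {α : Type} [Inhabited α] (xs ys : List α) (y d : α) :
    (xs ++ y :: ys).getD xs.length d = y := by
  simp [List.getD]

-- A's loop invariant: 'done' is the already-decided prefix (last element, if any, not "0"),
-- followed by the cnt-long current zero run, followed by the untouched suffix.
theorem singleton_ne_zero_str (c : Char) (hc : c ≠ '0') : (String.ofList [c] == "0") = false := by
  simp only [beq_eq_false_iff_ne, ne_eq]
  intro h; have := congrArg String.toList h; simp at this; exact hc this

-- A's loop invariant: 'done' is the already-decided prefix (last element, if any, not "0"),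
-- followed by the cnt-long current zero run, followed by the untouched suffix.
theorem foldA_inv (k : Int) : ∀ (rest : List Char) (done : List String) (cnt : Nat),
    (∀ h : done ≠ [], done.getLast h ≠ "0") →
    finishFilter k ((List.range' (done.length + cnt) rest.length).foldl (removeKStep k)
        (done ++ List.replicate cnt "0" ++ rest.map (fun c => String.ofList [c]), (cnt : Int), (done.length : Int) - 1))
    = done.filter (fun e => e != "N/A") ++ (tailSpec k cnt rest).map (fun c => String.ofList [c]) := by
  intro rest
  induction rest with
  | nil =>
    intro done cnt h0
    simp only [List.length_nil, List.range'_zero, List.foldl_nil, List.map_nil, List.append_nil]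
    unfold finishFilter
    simp only []
    by_cases hk : (cnt : Int) = k
    · rw [if_pos (by simpa using hk)]
      have hmark := mark_spec cnt done []
      simp only [List.append_nil] at hmark
      have hb1 : ((done.length : Int) - 1 + 1) = (done.length : Int) := by omega
      have hb2 : ((done.length : Int) - 1 + k + 1) = (done.length : Int) + (cnt : Int) := by omega
      rw [hb1, hb2, hmark]
      simp [tailSpec, hk, List.filter_append]
    · rw [if_neg (by simpa using hk)]
      simp [tailSpec, hk, List.filter_append]
  | cons c rest ih =>
    intro done cnt h0
    rw [List.length_cons, List.range'_succ, List.foldl_cons]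
    have hread : PySem.List.pyGetD
        (done ++ List.replicate cnt "0" ++ (c :: rest).map (fun c => String.ofList [c]))
        ((done.length + cnt : Nat) : Int) "" = String.ofList [c] := by
      rw [PySem.List.pyGetD_natCast]
      have hsh : done ++ List.replicate cnt "0" ++ (c :: rest).map (fun c => String.ofList [c])
          = (done ++ List.replicate cnt "0") ++
              String.ofList [c] :: rest.map (fun c => String.ofList [c]) := by simp
      rw [hsh]
      have hlen : done.length + cnt = (done ++ List.replicate cnt "0").length := by simp
      rw [hlen]
      exact getD_append_length _ _ _ _
    simp only [removeKStep]
    rw [hread]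
    by_cases hc : c = '0'
    · -- zero char: count it
      subst hc
      rw [if_pos (show (String.ofList ['0'] == "0") = true from rfl)]
      have hsh : done ++ List.replicate cnt "0" ++ (('0' :: rest).map (fun c => String.ofList [c]))
          = done ++ List.replicate (cnt + 1) "0" ++ rest.map (fun c => String.ofList [c]) := by
        rw [List.replicate_succ']
        simp
      rw [hsh]
      have ihh := ih done (cnt + 1) h0
      have hidx : done.length + cnt + 1 = done.length + (cnt + 1) := rfl
      rw [hidx]
      push_cast at ihh ⊢
      rw [ihh]
      simp [tailSpec]
    · -- non-zero char: possibly flush the pending zero run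
      rw [if_neg (by rw [singleton_ne_zero_str c hc]; exact Bool.false_ne_true)]
      cases cnt with
      | zero =>
        -- guard is false: either idx = 0 or the previous element is done's last, not "0"
        have hguard : ((((0 : Nat) : Int) == k) && decide (((done.length + 0 : Nat) : Int) - 1 ≥ 0) &&
            (PySem.List.pyGetD (done ++ List.replicate 0 "0" ++ (c :: rest).map (fun c => String.ofList [c]))
              (((done.length + 0 : Nat) : Int) - 1) "" == "0")) = false := by
          by_cases hd : done = []
          · subst hd; simp
          · have hlen : 1 ≤ done.length := by
              cases done
              · simp at hd
              · simp
            have hcast : ((done.length + 0 : Nat) : Int) - 1 = ((done.length - 1 : Nat) : Int) := by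
              push_cast [hlen]; omega
            rw [hcast, PySem.List.pyGetD_natCast]
            have hlt : done.length - 1 < done.length := by omega
            rw [List.replicate_zero, List.append_nil,
                List.getD_append _ _ _ _ hlt, List.getD_eq_getElem _ _ hlt]
            have hlast := h0 hd
            rw [List.getLast_eq_getElem hd] at hlast
            simp only [Bool.and_eq_false_iff]
            right
            simpa using hlast
        rw [hguard, if_neg Bool.false_ne_true]
        -- append the kept char to 'done'
        have hsh : done ++ List.replicate 0 "0" ++ (c :: rest).map (fun c => String.ofList [c])
            = (done ++ [String.ofList [c]]) ++ List.replicate 0 "0" ++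
                rest.map (fun c => String.ofList [c]) := by simp
        rw [hsh]
        have h0' : ∀ h : (done ++ [String.ofList [c]]) ≠ [], (done ++ [String.ofList [c]]).getLast h ≠ "0" := by
          intro _
          rw [List.getLast_concat]
          intro h
          have := congrArg String.toList h; simp at this; exact hc this
        have ihh := ih (done ++ [String.ofList [c]]) 0 h0'
        have hlen2 : (done ++ [String.ofList [c]]).length = done.length + 1 := by simp
        rw [hlen2] at ihh
        have hcast2 : ((done.length + 1 : Nat) : Int) - 1 = ((done.length : Int) + 1) - 1 := by push_cast; ring
        rw [hcast2] at ihh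
        have hc3 : ((done.length : Int) + 1) - 1 = ((done.length + 0 : Nat) : Int) := by push_cast; ring
        rw [hc3] at ihh
        have hr : done.length + 1 + 0 = done.length + 0 + 1 := by omega
        rw [hr] at ihh
        simp only [Nat.cast_zero] at ihh
        rw [ihh]
        rw [List.filter_append]
        simp [tailSpec, hc, singleton_ne_NA]
      | succ m =>
        -- previous element is "0" and idx ≥ 1: guard is ((cnt : Int) == k)
        have hprev : PySem.List.pyGetD
            (done ++ List.replicate (m + 1) "0" ++ (c :: rest).map (fun c => String.ofList [c]))
            (((done.length + (m + 1) : Nat) : Int) - 1) "" = "0" := by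
          have hcast : ((done.length + (m + 1) : Nat) : Int) - 1 = ((done.length + m : Nat) : Int) := by
            push_cast; ring
          rw [hcast, PySem.List.pyGetD_natCast]
          have hsh : done ++ List.replicate (m + 1) "0" ++ (c :: rest).map (fun c => String.ofList [c])
              = (done ++ List.replicate m "0") ++
                  "0" :: (String.ofList [c] :: rest.map (fun c => String.ofList [c])) := by
            rw [List.replicate_succ']
            simp
          rw [hsh]
          have hlen : done.length + m = (done ++ List.replicate m "0").length := by simp
          rw [hlen]
          exact getD_append_length _ _ _ _
        rw [hprev]
        have hd : decide ((((done.length + (m + 1) : Nat)) : Int) - 1 ≥ 0) = true := by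
          simp; omega
        rw [hd]
        simp only [BEq.rfl, Bool.and_true]
        by_cases hk : ((m + 1 : Nat) : Int) = k
        · rw [if_pos (by simpa using hk)]
          have hb1 : ((done.length : Int) - 1 + 1) = (done.length : Int) := by omega
          have hb2 : ((done.length : Int) - 1 + k + 1) = (done.length : Int) + ((m + 1 : Nat) : Int) := by
            rw [← hk]; push_cast; ring
          rw [hb1, hb2]
          have hmark := mark_spec (m + 1) done (String.ofList [c] :: rest.map (fun c => String.ofList [c]))
          rw [show String.ofList [c] :: List.map (fun c => String.ofList [c]) rest
              = List.map (fun c => String.ofList [c]) (c :: rest) from rfl] at hmark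
          rw [hmark]
          have hsh : done ++ List.replicate (m + 1) "N/A" ++ (c :: rest).map (fun c => String.ofList [c])
              = (done ++ List.replicate (m + 1) "N/A" ++ [String.ofList [c]]) ++ List.replicate 0 "0" ++
                  rest.map (fun c => String.ofList [c]) := by simp
          rw [hsh]
          have h0' : ∀ h : (done ++ List.replicate (m + 1) "N/A" ++ [String.ofList [c]]) ≠ [],
              (done ++ List.replicate (m + 1) "N/A" ++ [String.ofList [c]]).getLast h ≠ "0" := by
            intro _
            rw [List.getLast_concat]
            intro h
            have := congrArg String.toList h; simp at this; exact hc this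
          have ihh := ih (done ++ List.replicate (m + 1) "N/A" ++ [String.ofList [c]]) 0 h0'
          have hlen2 : (done ++ List.replicate (m + 1) "N/A" ++ [String.ofList [c]]).length
              = done.length + (m + 1) + 1 := by simp; omega
          rw [hlen2] at ihh
          have hcast2 : ((done.length + (m + 1) + 1 : Nat) : Int) - 1 = ((done.length + (m + 1) : Nat) : Int) := by
            push_cast; ring
          rw [hcast2] at ihh
          have hr : done.length + (m + 1) + 1 + 0 = done.length + (m + 1) + 1 := by omega
          rw [hr] at ihh
          simp only [Nat.cast_zero] at ihh
          rw [ihh]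
          rw [List.filter_append, List.filter_append]
          simp [tailSpec, hc, hk, singleton_ne_NA]
        · rw [if_neg (by simpa using hk)]
          have hsh : done ++ List.replicate (m + 1) "0" ++ (c :: rest).map (fun c => String.ofList [c])
              = (done ++ List.replicate (m + 1) "0" ++ [String.ofList [c]]) ++ List.replicate 0 "0" ++
                  rest.map (fun c => String.ofList [c]) := by simp
          rw [hsh]
          have h0' : ∀ h : (done ++ List.replicate (m + 1) "0" ++ [String.ofList [c]]) ≠ [],
              (done ++ List.replicate (m + 1) "0" ++ [String.ofList [c]]).getLast h ≠ "0" := by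
            intro _
            rw [List.getLast_concat]
            intro h
            have := congrArg String.toList h; simp at this; exact hc this
          have ihh := ih (done ++ List.replicate (m + 1) "0" ++ [String.ofList [c]]) 0 h0'
          have hlen2 : (done ++ List.replicate (m + 1) "0" ++ [String.ofList [c]]).length
              = done.length + (m + 1) + 1 := by simp; omega
          rw [hlen2] at ihh
          have hcast2 : ((done.length + (m + 1) + 1 : Nat) : Int) - 1 = ((done.length + (m + 1) : Nat) : Int) := by
            push_cast; ring
          rw [hcast2] at ihh
          have hr : done.length + (m + 1) + 1 + 0 = done.length + (m + 1) + 1 := by omega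
          rw [hr] at ihh
          simp only [Nat.cast_zero] at ihh
          rw [ihh]
          rw [List.filter_append, List.filter_append]
          have hrep : (List.replicate (m + 1) "0").filter (fun e => e != "N/A") = List.replicate (m + 1) "0" := by
            simp
          rw [hrep]
          have hmap : (List.replicate (m + 1) '0').map (fun c => String.ofList [c]) = List.replicate (m + 1) "0" := by
            simp
          simp [tailSpec, hc, singleton_ne_NA, List.map_append]
          rw [if_neg (by push_cast at hk ⊢; omega)]
          exact hmap.symm

theorem altRunEnd_drop (cs : List Char) (c : Char) (j : Nat) (hj : j ≤ cs.length) :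
    ∃ m, altRunEnd cs c j = j + m ∧ cs.drop j = List.replicate m c ++ cs.drop (j + m) ∧
      (cs.drop (j + m) = [] ∨ ∃ d t, cs.drop (j + m) = d :: t ∧ d ≠ c) := by
  unfold altRunEnd
  split
  · rename_i h
    split
    · rename_i hc
      obtain ⟨m, h1, h2, h3⟩ := altRunEnd_drop cs c (j + 1) (by omega)
      refine ⟨m + 1, by omega, ?_, ?_⟩
      · rw [List.drop_eq_getElem_cons h, h2, List.replicate_succ]
        have hcc : cs[j] = c := by simpa using hc
        rw [hcc]
        have harg : j + 1 + m = j + (m + 1) := by omega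
        rw [harg] at h2 ⊢
        simp
      · have harg : j + 1 + m = j + (m + 1) := by omega
        rwa [harg] at h3
    · rename_i hc
      refine ⟨0, by omega, by simp, Or.inr ⟨cs[j], cs.drop (j + 1), ?_, by simpa using hc⟩⟩
      rw [Nat.add_zero, List.drop_eq_getElem_cons h]
  · refine ⟨0, by omega, by simp, Or.inl ?_⟩
    rw [Nat.add_zero]
    exact List.drop_eq_nil_of_le (by omega)
termination_by cs.length - j

theorem tailSpec_shift (k : Int) : ∀ (m cnt : Nat) (rest : List Char),
    tailSpec k cnt (List.replicate m '0' ++ rest) = tailSpec k (cnt + m) rest := by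
  intro m
  induction m with
  | zero => intro cnt rest; simp
  | succ m ih =>
    intro cnt rest
    rw [List.replicate_succ]
    simp only [List.cons_append, tailSpec]
    rw [ih]
    have h2 : cnt + 1 + m = cnt + (m + 1) := by omega
    rw [h2]
    simp

theorem tailSpec_flush (k : Int) (m : Nat) (rest : List Char)
    (h : rest = [] ∨ ∃ d t, rest = d :: t ∧ d ≠ '0') :
    tailSpec k m rest = (if (m : Int) = k then [] else List.replicate m '0') ++ tailSpec k 0 rest := by
  rcases h with rfl | ⟨d, t, rfl, hd⟩
  · simp [tailSpec]
  · simp [tailSpec, hd]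

theorem tailSpec_nonzero_run (k : Int) (c : Char) (hc : c ≠ '0') : ∀ (m : Nat) (rest : List Char),
    tailSpec k 0 (List.replicate m c ++ rest) = List.replicate m c ++ tailSpec k 0 rest := by
  intro m
  induction m with
  | zero => intro rest; simp
  | succ m ih =>
    intro rest
    rw [List.replicate_succ]
    simp only [List.cons_append, tailSpec, if_neg hc]
    simp [ih]

theorem altLoop_spec (cs : List Char) (k : Int) (i : Nat) :
    ((altLoop cs k i).map String.toList).flatten = tailSpec k 0 (cs.drop i) := by
  by_cases h : i < cs.length
  · obtain ⟨m, hend, hdrop1, hflush⟩ := altRunEnd_drop cs cs[i] (i + 1) (by omega)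
    have hdropi : cs.drop i = List.replicate (m + 1) cs[i] ++ cs.drop (i + 1 + m) := by
      rw [List.drop_eq_getElem_cons h, hdrop1, List.replicate_succ]
      simp
    have hslice : PySem.List.slice cs (some (i : Int)) (some ((i + 1 + m : Nat) : Int)) =
        List.replicate (m + 1) cs[i] := by
      rw [PySem.List.slice_natCast]
      have harg : i + 1 + m - i = m + 1 := by omega
      rw [harg, hdropi]
      rw [List.take_append_of_le_length (by simp)]
      simp
    have ih := altLoop_spec cs k (altRunEnd cs cs[i] (i + 1))
    rw [hend] at ih
    rw [altLoop]
    rw [dif_pos h]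
    rw [hend]
    by_cases hc : cs[i] = '0'
    · by_cases hk : ((i + 1 + m : Nat) : Int) - ((i : Nat) : Int) = k
      · rw [if_pos (by simp [hc]; push_cast at hk ⊢; omega)]
        rw [ih, hdropi, hc, tailSpec_shift]
        rw [tailSpec_flush k (0 + (m + 1)) (cs.drop (i + 1 + m)) (by rw [hc] at hflush; exact hflush)]
        rw [if_pos (by push_cast at hk ⊢; omega)]
        simp
      · rw [if_neg (by simp [hc]; push_cast at hk ⊢; omega)]
        simp only [List.map_cons, List.flatten_cons, hslice]
        rw [ih, hdropi, hc, tailSpec_shift]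
        rw [tailSpec_flush k (0 + (m + 1)) (cs.drop (i + 1 + m)) (by rw [hc] at hflush; exact hflush)]
        rw [if_neg (by push_cast at hk ⊢; omega)]
        simp
    · rw [if_neg (by simp [hc])]
      simp only [List.map_cons, List.flatten_cons, hslice]
      rw [ih, hdropi]
      rw [tailSpec_nonzero_run k cs[i] hc]
      simp
  · rw [altLoop, dif_neg h]
    rw [List.drop_eq_nil_of_le (by omega)]
    simp [tailSpec]
termination_by cs.length - i
decreasing_by have := altRunEnd_ge cs cs[i] (i + 1); omega

theorem remove_k_zeros_spec' (s : String) (k : Int) :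
    remove_k_zeros s k = remove_k_zeros_alt s k := by
  apply String.toList_inj.mp
  have hL : remove_k_zeros s k = PySem.Str.join ""
      (finishFilter k ((List.range (s.toList.map (fun c => String.ofList [c])).length).foldl
        (removeKStep k) (s.toList.map (fun c => String.ofList [c]), 0, -1))) := rfl
  rw [List.range_eq_range', List.length_map] at hL
  have hA := foldA_inv k s.toList [] 0 (fun h => absurd rfl h)
  simp only [List.length_nil, List.nil_append, List.replicate_zero, Nat.cast_zero, zero_sub,
    Nat.add_zero, List.filter_nil] at hA
  rw [hA] at hL
  have hB := altLoop_spec s.toList k 0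
  rw [List.drop_zero] at hB
  rw [hL]
  unfold remove_k_zeros_alt
  rw [PySem.Str.toList_join, PySem.Str.toList_join]
  rw [show ("" : String).toList = [] from rfl]
  rw [join_nil_eq_flatten, join_nil_eq_flatten]
  rw [hB]
  have hmapc : List.map String.toList (List.map (fun c => String.ofList [c]) (tailSpec k 0 s.toList))
      = List.map (fun c => [c]) (tailSpec k 0 s.toList) := by simp
  rw [hmapc, ← join_nil_eq_flatten, PySem.Chars.join_nil_singletons]

-- ===== VERDICT (by name: the statement is the Claim_ definition above) =====
theorem remove_k_zeros_spec : Claim_equal_remove_k_zeros := by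
  intro s k _
  unfold Spec_remove_k_zeros
  exact remove_k_zeros_spec' s k
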